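-- pv_equiv track=rewrite | github.com/EdwardZehuaZhang/3d-printing-monorepo | rhino8-internal-wire/actual pluggin folder/rh8/libs/UNNcBibN/wire_router/core.py | _is_valid_detour_candidate
-- ===== SOURCE A (Python) =====
-- from typing import Dict, FrozenSet, Iterable, Iterator, List, Optional, Sequence, Set, Tuple
--
-- GridIndex = Tuple[int, int, int]
--
-- _DILATION_OFFSET_CACHE: Dict[int, Tuple[Tuple[int, int, int], ...]] = {}
--
-- def _dilation_offsets(radius: int) -> Tuple[Tuple[int, int, int], ...]:
--     """Return cached offset tuples for the given Chebyshev radius."""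
--     if radius in _DILATION_OFFSET_CACHE:
--         return _DILATION_OFFSET_CACHE[radius]
--     offsets = tuple(
--         (dx, dy, dz)
--         for dx in range(-radius, radius + 1)
--         for dy in range(-radius, radius + 1)
--         for dz in range(-radius, radius + 1)
--     )
--     _DILATION_OFFSET_CACHE[radius] = offsets
--     return offsets
--
-- def _has_nonlocal_close_approach(
--     path: Sequence[GridIndex],
--     radius: int,
--     local_window: int = 3,
-- ) -> bool:
--     if radius <= 0:
--         return len(set(path)) != len(path)
--
--     # Spatial-dict approach: O(n * r^3) instead of O(n^2).
--     offsets = _dilation_offsets(radius)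
--     earliest: Dict[GridIndex, int] = {}
--     for i, cell in enumerate(path):
--         for dx, dy, dz in offsets:
--             nb = (cell[0] + dx, cell[1] + dy, cell[2] + dz)
--             if nb in earliest and i - earliest[nb] > local_window:
--                 return True
--         if cell not in earliest:
--             earliest[cell] = i
--     return False
--
-- def _is_valid_detour_candidate(
--     candidate: Sequence[GridIndex],
--     valid_cells: Set[GridIndex],
--     occupied_cells: Set[GridIndex],
--     self_avoid_radius: int,
--     precomputed_blocked: Optional[Set[GridIndex]] = None,
-- ) -> bool:
--     if len(set(candidate)) != len(candidate):
--         return False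
--     if any(cell not in valid_cells for cell in candidate):
--         return False
--
--     internal = set(candidate[1:-1])
--     if internal & occupied_cells:
--         return False
--
--     if self_avoid_radius <= 0:
--         return True
--
--     blocked_cells = precomputed_blocked if precomputed_blocked is not None else dilate_cells(occupied_cells, self_avoid_radius)
--     if internal & blocked_cells:
--         return False
--
--     return not _has_nonlocal_close_approach(candidate, self_avoid_radius)
--
-- def dilate_cells(cells: Iterable[GridIndex], radius: int) -> Set[GridIndex]:
--     cells = set(cells)
--     if radius <= 0:
--         return set(cells)
--
--     offsets = _dilation_offsets(radius)
--     dilated: Set[GridIndex] = set()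
--     for cx, cy, cz in cells:
--         for dx, dy, dz in offsets:
--             dilated.add((cx + dx, cy + dy, cz + dz))
--     return dilated
-- ===== SOURCE B (Python) =====
-- def _cheb_close(a, b, r):
--     return max(abs(a[0] - b[0]), abs(a[1] - b[1]), abs(a[2] - b[2])) <= r
--
-- def _has_close_pair(path, r):
--     # lag-buffer pairwise scan: compare each cell with every cell >= 4 steps behind
--     old = []
--     recent = []
--     for cell in path:
--         if len(recent) == 4:
--             old.append(recent.pop(0))
--         if any(_cheb_close(cell, o, r) for o in old):
--             return True
--         recent.append(cell)
--     return False
--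
-- def _is_valid_detour_candidate(candidate, valid_cells, occupied_cells,
--                                self_avoid_radius, precomputed_blocked=None):
--     seen = set()
--     for cell in candidate:
--         if cell in seen or cell not in valid_cells:
--             return False
--         seen.add(cell)
--     internal = candidate[1:-1]
--     if any(cell in occupied_cells for cell in internal):
--         return False
--     if self_avoid_radius <= 0:
--         return True
--     if precomputed_blocked is not None:
--         blocked_hit = any(cell in precomputed_blocked for cell in internal)
--     else:
--         blocked_hit = any(_cheb_close(cell, occ, self_avoid_radius)
--                           for cell in internal for occ in occupied_cells)
--     if blocked_hit:
--         return False
--     return not _has_close_pair(candidate, self_avoid_radius)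
-- ===== Notes on version B (the rewrite author's own statement) =====
-- stated objective: alternative
-- what changed: The nonlocal self-approach test replaces A's precomputed offset-ball and earliest-index spatial dict with a lag-buffer pairwise Chebyshev scan, the duplicate and validity checks are fused into one pass over the candidate with a seen-set, and when no precomputed blocked set is given the dilated occupied set is never built: internal cells are compared directly against occupied cells by Chebyshev distance.
import Mathlib
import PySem

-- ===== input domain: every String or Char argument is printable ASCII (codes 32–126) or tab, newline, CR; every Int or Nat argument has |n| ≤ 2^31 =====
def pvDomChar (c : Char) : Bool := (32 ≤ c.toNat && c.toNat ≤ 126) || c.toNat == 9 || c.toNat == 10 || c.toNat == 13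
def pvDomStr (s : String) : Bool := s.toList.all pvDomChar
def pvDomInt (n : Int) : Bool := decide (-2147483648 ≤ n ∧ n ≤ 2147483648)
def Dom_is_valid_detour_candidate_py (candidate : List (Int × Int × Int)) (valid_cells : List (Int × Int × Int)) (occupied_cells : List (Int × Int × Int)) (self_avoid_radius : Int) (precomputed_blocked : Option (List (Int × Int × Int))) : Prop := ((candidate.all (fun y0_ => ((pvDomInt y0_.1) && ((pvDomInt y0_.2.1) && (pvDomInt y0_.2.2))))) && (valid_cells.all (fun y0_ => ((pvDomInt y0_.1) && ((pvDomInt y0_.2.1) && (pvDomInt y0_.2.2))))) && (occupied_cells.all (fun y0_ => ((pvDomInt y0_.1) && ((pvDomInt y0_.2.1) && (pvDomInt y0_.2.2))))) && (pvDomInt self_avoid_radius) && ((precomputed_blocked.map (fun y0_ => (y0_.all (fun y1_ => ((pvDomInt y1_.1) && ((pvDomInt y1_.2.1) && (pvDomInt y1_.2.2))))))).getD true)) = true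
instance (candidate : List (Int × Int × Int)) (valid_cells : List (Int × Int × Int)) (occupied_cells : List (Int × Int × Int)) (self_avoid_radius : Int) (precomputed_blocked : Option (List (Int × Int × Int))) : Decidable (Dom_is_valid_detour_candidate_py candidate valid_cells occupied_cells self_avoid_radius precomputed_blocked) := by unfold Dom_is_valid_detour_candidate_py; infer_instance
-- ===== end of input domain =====

-- B replaces the offset-ball spatial dict of A's self-approach test by a lag-buffer
-- pairwise Chebyshev scan and tests blocked cells directly against occupied cells,
-- never building the dilated set (objective: alternative decomposition).

-- ===== PORT A =====

-- _dilation_offsets (the cache is pure memoization and does not affect the value)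
def pvOffsets (radius : Int) : List (Int × Int × Int) :=
  (PySem.List.pyRange (-radius) (radius + 1) 1).flatMap (fun dx =>
    (PySem.List.pyRange (-radius) (radius + 1) 1).flatMap (fun dy =>
      (PySem.List.pyRange (-radius) (radius + 1) 1).map (fun dz => (dx, dy, dz))))

-- the for-loop of _has_nonlocal_close_approach (early return = match on each cell)
def pvNLLoop (offs : List (Int × Int × Int)) (rest : List (Int × Int × Int)) (i : Int)
    (earliest : PySem.Dict (Int × Int × Int) Int) : Bool :=
  match rest with
  | [] => false
  | cell :: rest' =>
    if offs.any (fun o =>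
        match earliest.get? (cell.1 + o.1, cell.2.1 + o.2.1, cell.2.2 + o.2.2) with
        | some j => decide (i - j > 3)
        | none => false) then
      true
    else
      pvNLLoop offs rest' (i + 1)
        (if earliest.contains cell then earliest else earliest.insert cell i)

def pvHasNonlocalCloseApproach (path : List (Int × Int × Int)) (radius : Int) : Bool :=
  if radius ≤ 0 then decide ((PySem.Set.ofList path).length ≠ path.length)
  else pvNLLoop (pvOffsets radius) path 0 PySem.Dict.empty

def pvDilateCells (cells : List (Int × Int × Int)) (radius : Int) : List (Int × Int × Int) :=
  let cellsS : PySem.Set (Int × Int × Int) := PySem.Set.ofList cells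
  if radius ≤ 0 then PySem.Set.ofList cellsS
  else
    cellsS.foldl (fun dil c =>
        (pvOffsets radius).foldl (fun dil o =>
          PySem.Set.add dil (c.1 + o.1, c.2.1 + o.2.1, c.2.2 + o.2.2)) dil)
      PySem.Set.empty

def is_valid_detour_candidate_py (candidate : List (Int × Int × Int)) (valid_cells : List (Int × Int × Int)) (occupied_cells : List (Int × Int × Int)) (self_avoid_radius : Int) (precomputed_blocked : Option (List (Int × Int × Int))) : Bool :=
  if (PySem.Set.ofList candidate).length ≠ candidate.length then false
  else if candidate.any (fun c => !(PySem.Set.contains valid_cells c)) then false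
  else
    let internal := PySem.Set.ofList (PySem.List.slice candidate (some 1) (some (-1)))
    if PySem.Set.inter internal occupied_cells ≠ [] then false
    else if self_avoid_radius ≤ 0 then true
    else
      let blocked := match precomputed_blocked with
        | some b => b
        | none => pvDilateCells occupied_cells self_avoid_radius
      if PySem.Set.inter internal blocked ≠ [] then false
      else !(pvHasNonlocalCloseApproach candidate self_avoid_radius)

-- ===== PORT B =====

-- _cheb_close
def pvChebClose (a b : Int × Int × Int) (r : Int) : Bool :=
  decide (max |a.1 - b.1| (max |a.2.1 - b.2.1| |a.2.2 - b.2.2|) ≤ r)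

-- B's single duplicate-and-validity pass over candidate
def pvScanDupValid (valid : List (Int × Int × Int)) (cells : List (Int × Int × Int))
    (seen : PySem.Set (Int × Int × Int)) : Bool :=
  match cells with
  | [] => true
  | cell :: rest =>
    if PySem.Set.contains seen cell || !(PySem.Set.contains valid cell) then false
    else pvScanDupValid valid rest (PySem.Set.add seen cell)

-- _has_close_pair's loop: `recent` is the lag buffer, `old` the cells ≥ 4 steps behind
def pvClosePairLoop (r : Int) (cells old recent : List (Int × Int × Int)) : Bool :=
  match cells with
  | [] => false
  | cell :: rest =>
    let p := if recent.length == 4 then (old ++ [recent.headD (0, 0, 0)], recent.tail)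
             else (old, recent)
    if p.1.any (fun o => pvChebClose cell o r) then true
    else pvClosePairLoop r rest p.1 (p.2 ++ [cell])

def is_valid_detour_candidate_py_alt (candidate : List (Int × Int × Int)) (valid_cells : List (Int × Int × Int)) (occupied_cells : List (Int × Int × Int)) (self_avoid_radius : Int) (precomputed_blocked : Option (List (Int × Int × Int))) : Bool :=
  if !(pvScanDupValid valid_cells candidate PySem.Set.empty) then false
  else
    let internal := PySem.List.slice candidate (some 1) (some (-1))
    if internal.any (fun c => PySem.Set.contains occupied_cells c) then false
    else if self_avoid_radius ≤ 0 then true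
    else
      let blockedHit := match precomputed_blocked with
        | some blocked => internal.any (fun c => PySem.Set.contains blocked c)
        | none => internal.any (fun c =>
            occupied_cells.any (fun o => pvChebClose c o self_avoid_radius))
      if blockedHit then false
      else !(pvClosePairLoop self_avoid_radius candidate [] [])

-- ===== PRECONDITION & SPEC =====
def Spec_is_valid_detour_candidate_py (candidate : List (Int × Int × Int)) (valid_cells : List (Int × Int × Int)) (occupied_cells : List (Int × Int × Int)) (self_avoid_radius : Int) (precomputed_blocked : Option (List (Int × Int × Int))) (out : Bool) : Prop := out = is_valid_detour_candidate_py_alt candidate valid_cells occupied_cells self_avoid_radius precomputed_blocked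
instance (candidate : List (Int × Int × Int)) (valid_cells : List (Int × Int × Int)) (occupied_cells : List (Int × Int × Int)) (self_avoid_radius : Int) (precomputed_blocked : Option (List (Int × Int × Int))) (out : Bool) : Decidable (Spec_is_valid_detour_candidate_py candidate valid_cells occupied_cells self_avoid_radius precomputed_blocked out) := by unfold Spec_is_valid_detour_candidate_py; infer_instance

-- ===== CLAIM (what is proved, stated in full; the proofs are below) =====
def Claim_equal_is_valid_detour_candidate_py : Prop := ∀ (candidate : List (Int × Int × Int)) (valid_cells : List (Int × Int × Int)) (occupied_cells : List (Int × Int × Int)) (self_avoid_radius : Int) (precomputed_blocked : Option (List (Int × Int × Int))), Dom_is_valid_detour_candidate_py candidate valid_cells occupied_cells self_avoid_radius precomputed_blocked → Spec_is_valid_detour_candidate_py candidate valid_cells occupied_cells self_avoid_radius precomputed_blocked (is_valid_detour_candidate_py candidate valid_cells occupied_cells self_avoid_radius precomputed_blocked)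

-- ===== LEMMAS AND PROOFS =====

lemma pv_ofList_length_iff_nodup (xs : List (Int × Int × Int)) :
    (PySem.Set.ofList xs).length = xs.length ↔ xs.Nodup := by
  constructor
  · intro h
    induction xs with
    | nil => exact List.nodup_nil
    | cons x xs ih =>
      rw [PySem.Set.ofList_cons] at h
      simp only [List.length_cons] at h
      have h1 : ((PySem.Set.ofList xs).discard x).length ≤ (PySem.Set.ofList xs).length :=
        List.length_filter_le _ _
      have h2 := PySem.Set.length_ofList_le xs
      have hlen : ((PySem.Set.ofList xs).discard x).length = xs.length := by omega
      have hol : (PySem.Set.ofList xs).length = xs.length := by omega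
      have hnd := ih hol
      have hself : PySem.Set.ofList xs = xs := PySem.Set.ofList_eq_self_of_nodup xs hnd
      have hx : x ∉ xs := by
        intro hmem
        have : ((PySem.Set.ofList xs).discard x).length < (PySem.Set.ofList xs).length := by
          rw [PySem.Set.discard, List.length_filter_lt_length_iff_exists]
          exact ⟨x, by rw [hself]; exact hmem, by simp⟩
        omega
      exact List.nodup_cons.mpr ⟨hx, hnd⟩
  · intro h; rw [PySem.Set.ofList_eq_self_of_nodup xs h]

lemma pv_scan_iff (valid cells seen : List (Int × Int × Int)) :
    pvScanDupValid valid cells seen = true ↔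
      cells.Nodup ∧ (∀ c ∈ cells, c ∈ valid) ∧ (∀ c ∈ cells, c ∉ seen) := by
  induction cells generalizing seen with
  | nil => simp [pvScanDupValid]
  | cons cell rest ih =>
    rw [pvScanDupValid]
    by_cases hs : cell ∈ seen
    · rw [if_pos (by simp [hs])]
      constructor
      · intro h; exact absurd h (by simp)
      · rintro ⟨_, _, h⟩; exact (h cell (by simp) hs).elim
    · by_cases hv : cell ∈ valid
      · rw [if_neg (by simp [hs, hv]), ih]
        constructor
        · rintro ⟨hnd, h1, h2⟩
          refine ⟨List.nodup_cons.mpr ⟨fun h => ?_, hnd⟩, ?_, ?_⟩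
          · exact h2 cell h (by simp [PySem.Set.mem_add])
          · intro c hc; rcases List.mem_cons.mp hc with h | h
            · exact h ▸ hv
            · exact h1 c h
          · intro c hc hcs; rcases List.mem_cons.mp hc with h | h
            · exact hs (h ▸ hcs)
            · exact h2 c h (by simp [PySem.Set.mem_add, hcs])
        · rintro ⟨hnd, h1, h2⟩
          refine ⟨(List.nodup_cons.mp hnd).2, fun c hc => h1 c (by simp [hc]), ?_⟩
          intro c hc hca
          rcases (PySem.Set.mem_add _ _ _).mp hca with h | h
          · exact h2 c (by simp [hc]) h
          · exact (List.nodup_cons.mp hnd).1 (h ▸ hc)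
      · rw [if_pos (by simp [hv])]
        constructor
        · intro h; exact absurd h (by simp)
        · rintro ⟨_, h, _⟩; exact (hv (h cell (by simp))).elim

lemma pv_mem_offsets (r : Int) (o : Int × Int × Int) :
    o ∈ pvOffsets r ↔ (-r ≤ o.1 ∧ o.1 ≤ r) ∧ (-r ≤ o.2.1 ∧ o.2.1 ≤ r) ∧
      (-r ≤ o.2.2 ∧ o.2.2 ≤ r) := by
  obtain ⟨a, b, c⟩ := o
  simp only [pvOffsets, List.mem_flatMap, List.mem_map, PySem.List.mem_pyRange_one]
  constructor
  · rintro ⟨dx, hx, dy, hy, dz, hz, rfl, rfl, rfl⟩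
    exact ⟨⟨hx.1, by omega⟩, ⟨hy.1, by omega⟩, ⟨hz.1, by omega⟩⟩
  · rintro ⟨⟨h1, h2⟩, ⟨h3, h4⟩, h5, h6⟩
    exact ⟨a, ⟨h1, by omega⟩, b, ⟨h3, by omega⟩, c, ⟨h5, by omega⟩, rfl⟩

lemma pv_neighbour_iff (r : Int) (c k : Int × Int × Int) :
    (∃ o ∈ pvOffsets r, (c.1 + o.1, c.2.1 + o.2.1, c.2.2 + o.2.2) = k) ↔
      pvChebClose c k r = true := by
  simp only [pvChebClose, decide_eq_true_eq, max_le_iff, abs_le]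
  constructor
  · rintro ⟨o, ho, rfl⟩
    rw [pv_mem_offsets] at ho
    simp only
    omega
  · rintro ⟨⟨h1, h2⟩, ⟨h3, h4⟩, h5, h6⟩
    refine ⟨(k.1 - c.1, k.2.1 - c.2.1, k.2.2 - c.2.2), ?_, by simp⟩
    rw [pv_mem_offsets]
    simp only
    omega

lemma pv_mem_nested_foldl (cells : List (Int × Int × Int)) (offs : List (Int × Int × Int))
    (f : (Int × Int × Int) → (Int × Int × Int) → (Int × Int × Int))
    (init : PySem.Set (Int × Int × Int)) (y : Int × Int × Int) :
    y ∈ cells.foldl (fun dil c => offs.foldl (fun dil o => PySem.Set.add dil (f c o)) dil) init ↔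
      y ∈ init ∨ ∃ c ∈ cells, ∃ o ∈ offs, y = f c o := by
  induction cells generalizing init with
  | nil => simp
  | cons c cs ih =>
    simp only [List.foldl_cons, ih, PySem.Set.mem_foldl_add]
    constructor
    · rintro (⟨h | ⟨o, ho, rfl⟩⟩ | ⟨c', hc', o, ho, rfl⟩)
      · exact Or.inl h
      · exact Or.inr ⟨c, by simp, o, ho, rfl⟩
      · exact Or.inr ⟨c', by simp [hc'], o, ho, rfl⟩
    · rintro (h | ⟨c', hc', o, ho, rfl⟩)
      · exact Or.inl (Or.inl h)
      · rcases List.mem_cons.mp hc' with rfl | h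
        · exact Or.inl (Or.inr ⟨o, ho, rfl⟩)
        · exact Or.inr ⟨c', h, o, ho, rfl⟩

lemma pv_cheb_symm (a b : Int × Int × Int) (r : Int) :
    pvChebClose a b r = pvChebClose b a r := by
  simp only [pvChebClose]
  congr 1
  rw [abs_sub_comm a.1, abs_sub_comm a.2.1, abs_sub_comm a.2.2]

lemma pv_mem_dilate (occ : List (Int × Int × Int)) (r : Int) (hr : ¬ r ≤ 0)
    (x : Int × Int × Int) :
    x ∈ pvDilateCells occ r ↔ ∃ c ∈ occ, pvChebClose x c r = true := by
  simp only [pvDilateCells, if_neg hr]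
  rw [pv_mem_nested_foldl]
  simp only [PySem.Set.empty, List.not_mem_nil, false_or]
  constructor
  · rintro ⟨c, hc, o, ho, rfl⟩
    refine ⟨c, (PySem.Set.mem_ofList occ c).mp hc, ?_⟩
    rw [pv_cheb_symm, ← pv_neighbour_iff]
    exact ⟨o, ho, rfl⟩
  · rintro ⟨c, hc, hcheb⟩
    rw [pv_cheb_symm, ← pv_neighbour_iff] at hcheb
    obtain ⟨o, ho, rfl⟩ := hcheb
    exact ⟨c, (PySem.Set.mem_ofList occ c).mpr hc, o, ho, rfl⟩

-- the dict A builds over a duplicate-free prefix, concretely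
def pvDictOf (pre : List (Int × Int × Int)) : PySem.Dict (Int × Int × Int) Int :=
  ⟨pre.zipIdx.map (fun p => (p.1, (p.2 : Int)))⟩

lemma pv_dictOf_keys (pre : List (Int × Int × Int)) : (pvDictOf pre).keys = pre := by
  simp only [PySem.Dict.keys, pvDictOf, List.map_map]
  have : ((fun x => x.1) ∘ fun p : (Int × Int × Int) × Nat => (p.1, (p.2 : Int))) =
      Prod.fst := by funext p; rfl
  rw [this]
  exact List.zipIdx_map_fst 0 pre

lemma pv_dictOf_get (pre : List (Int × Int × Int)) (hnd : pre.Nodup)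
    (k : Int × Int × Int) (j : Int) :
    (pvDictOf pre).get? k = some j ↔ ∃ jn : Nat, pre[jn]? = some k ∧ j = (jn : Int) := by
  rw [PySem.Dict.get?_eq_some_iff_mem_items _ _ _ (by rw [pv_dictOf_keys]; exact hnd)]
  simp only [pvDictOf, List.mem_map]
  constructor
  · rintro ⟨⟨k', jn⟩, hmem, heq⟩
    simp only [Prod.mk.injEq] at heq
    obtain ⟨rfl, rfl⟩ := heq
    exact ⟨jn, List.mk_mem_zipIdx_iff_getElem?.mp hmem, rfl⟩
  · rintro ⟨jn, hget, rfl⟩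
    exact ⟨(k, jn), List.mk_mem_zipIdx_iff_getElem?.mpr hget, rfl⟩

lemma pv_dictOf_append (pre : List (Int × Int × Int)) (cell : Int × Int × Int)
    (h : cell ∉ pre) :
    (pvDictOf pre).insert cell (pre.length : Int) = pvDictOf (pre ++ [cell]) := by
  have hc : (pvDictOf pre).contains cell = false := by
    rw [Bool.eq_false_iff]
    intro hcon
    exact h (by rw [← pv_dictOf_keys pre]; exact (PySem.Dict.contains_iff_mem_keys _ _).mp hcon)
  apply PySem.Dict.ext
  rw [PySem.Dict.items_insert_of_not_contains _ _ hc]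
  simp only [pvDictOf, List.zipIdx_append, List.map_append, List.zipIdx, Nat.zero_add]
  rfl

lemma pv_loop_eq (r : Int) (rest pre : List (Int × Int × Int))
    (hnd : (pre ++ rest).Nodup) :
    pvNLLoop (pvOffsets r) rest (pre.length : Int) (pvDictOf pre) =
      pvClosePairLoop r rest (pre.take (pre.length - 4)) (pre.drop (pre.length - 4)) := by
  induction rest generalizing pre with
  | nil => rfl
  | cons cell rest' ih =>
    have hndpre : pre.Nodup := (List.nodup_append.mp hnd).1
    have hcellpre : cell ∉ pre := by
      intro h
      exact (List.nodup_append.mp hnd).2.2 cell h cell (by simp) rfl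
    rw [pvNLLoop, pvClosePairLoop]
    -- the shifted pair is (take (n-3), drop (n-3))
    have hp : (if (pre.drop (pre.length - 4)).length == 4 then
          (pre.take (pre.length - 4) ++ [(pre.drop (pre.length - 4)).headD (0, 0, 0)],
           (pre.drop (pre.length - 4)).tail)
        else (pre.take (pre.length - 4), pre.drop (pre.length - 4))) =
        (pre.take (pre.length - 3), pre.drop (pre.length - 3)) := by
      by_cases h4 : 4 ≤ pre.length
      · rw [if_pos (by rw [beq_iff_eq, List.length_drop]; omega)]
        have hlt : pre.length - 4 < pre.length := by omega
        have hhead : (pre.drop (pre.length - 4)).headD (0, 0, 0) = pre[pre.length - 4] := by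
          rw [List.headD_eq_head?, List.head?_drop, List.getElem?_eq_getElem hlt]
          rfl
        have htake : pre.take (pre.length - 4) ++ [pre[pre.length - 4]] =
            pre.take (pre.length - 3) := by
          have : pre.length - 3 = (pre.length - 4) + 1 := by omega
          rw [this, List.take_add_one, List.getElem?_eq_getElem hlt]
          rfl
        have hdrop : (pre.drop (pre.length - 4)).tail = pre.drop (pre.length - 3) := by
          rw [List.tail_drop]
          congr 1
          omega
        rw [hhead, htake, hdrop]
      · rw [if_neg (by rw [beq_iff_eq, List.length_drop]; omega)]
        have h3 : pre.length - 3 = pre.length - 4 := by omega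
        rw [h3]
    rw [hp]
    -- guards agree
    have hguard : ((pvOffsets r).any (fun o =>
        match (pvDictOf pre).get? (cell.1 + o.1, cell.2.1 + o.2.1, cell.2.2 + o.2.2) with
        | some j => decide ((pre.length : Int) - j > 3)
        | none => false)) =
        ((pre.take (pre.length - 3)).any (fun o => pvChebClose cell o r)) := by
      rw [Bool.eq_iff_iff]
      simp only [List.any_eq_true]
      constructor
      · rintro ⟨o, ho, hmatch⟩
        rcases hget : (pvDictOf pre).get? (cell.1 + o.1, cell.2.1 + o.2.1, cell.2.2 + o.2.2)
          with _ | j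
        · rw [hget] at hmatch; simp at hmatch
        · rw [hget] at hmatch
          simp only [decide_eq_true_eq] at hmatch
          obtain ⟨jn, hjn, rfl⟩ := (pv_dictOf_get pre hndpre _ _).mp hget
          have hjnlen : jn < pre.length := by
            have := List.getElem?_eq_some_iff.mp hjn
            exact this.1
          refine ⟨(cell.1 + o.1, cell.2.1 + o.2.1, cell.2.2 + o.2.2), ?_, ?_⟩
          · rw [List.mem_take_iff_getElem]
            refine ⟨jn, by omega, ?_⟩
            have := List.getElem?_eq_some_iff.mp hjn
            exact this.2
          · rw [← pv_neighbour_iff]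
            exact ⟨o, ho, rfl⟩
      · rintro ⟨k, hk, hcheb⟩
        rw [List.mem_take_iff_getElem] at hk
        obtain ⟨jn, hjn, hjk⟩ := hk
        rw [← pv_neighbour_iff] at hcheb
        obtain ⟨o, ho, hok⟩ := hcheb
        refine ⟨o, ho, ?_⟩
        have hget : (pvDictOf pre).get? (cell.1 + o.1, cell.2.1 + o.2.1, cell.2.2 + o.2.2)
            = some (jn : Int) := by
          rw [pv_dictOf_get pre hndpre]
          refine ⟨jn, ?_, rfl⟩
          rw [List.getElem?_eq_getElem (by omega : jn < pre.length), hok, hjk]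
        rw [hget]
        simp only [decide_eq_true_eq]
        omega
    dsimp only
    rw [hguard]
    by_cases hg : ((pre.take (pre.length - 3)).any (fun o => pvChebClose cell o r)) = true
    · rw [if_pos hg, if_pos hg]
    · rw [if_neg hg, if_neg hg]
      -- recursive case
      have hcon : (pvDictOf pre).contains cell = false := by
        rw [Bool.eq_false_iff]
        intro hcon
        apply hcellpre
        rw [← pv_dictOf_keys pre]
        exact (PySem.Dict.contains_iff_mem_keys _ _).mp hcon
      rw [if_neg (by simp [hcon]), pv_dictOf_append pre cell hcellpre]
      have hnd' : ((pre ++ [cell]) ++ rest').Nodup := by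
        rw [List.append_assoc]; simpa using hnd
      have := ih (pre ++ [cell]) hnd'
      have hlen : ((pre ++ [cell]).length : Int) = (pre.length : Int) + 1 := by
        simp
      rw [hlen] at this
      rw [this]
      congr 1
      · rw [List.length_append, List.length_cons, List.length_nil,
            List.take_append_of_le_length (by omega),
            show pre.length + (0 + 1) - 4 = pre.length - 3 from by omega]
      · rw [List.length_append, List.length_cons, List.length_nil,
            List.drop_append_of_le_length (by omega),
            show pre.length + (0 + 1) - 4 = pre.length - 3 from by omega]

lemma pv_inter_ne_nil_iff (s t : List (Int × Int × Int)) :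
    PySem.Set.inter s t ≠ [] ↔ ∃ x ∈ s, x ∈ t := by
  rw [← List.isEmpty_eq_false_iff, List.isEmpty_eq_false_iff_exists_mem]
  constructor
  · rintro ⟨x, hx⟩; exact ⟨x, (PySem.Set.mem_inter s t x).mp hx⟩
  · rintro ⟨x, hx1, hx2⟩; exact ⟨x, (PySem.Set.mem_inter s t x).mpr ⟨hx1, hx2⟩⟩


-- ===== VERDICT (by name: the statement is the Claim_ definition above) =====
theorem is_valid_detour_candidate_py_spec : Claim_equal_is_valid_detour_candidate_py := by
  intro candidate valid_cells occupied_cells r pre _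
  unfold Spec_is_valid_detour_candidate_py is_valid_detour_candidate_py
    is_valid_detour_candidate_py_alt
  by_cases hnd : candidate.Nodup
  · by_cases hval : ∀ c ∈ candidate, c ∈ valid_cells
    · -- both gates pass
      have hscan : pvScanDupValid valid_cells candidate PySem.Set.empty = true :=
        (pv_scan_iff _ _ _).mpr ⟨hnd, hval, by simp [PySem.Set.empty]⟩
      rw [if_neg (not_ne_iff.mpr ((pv_ofList_length_iff_nodup candidate).mpr hnd))]
      rw [if_neg (by
        rw [Bool.not_eq_true, List.any_eq_false]
        intro c hc
        simpa using hval c hc)]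
      rw [if_neg (show ¬((!pvScanDupValid valid_cells candidate PySem.Set.empty) = true) from by
        rw [hscan]; decide)]
      dsimp only
      set sl := PySem.List.slice candidate (some 1) (some (-1))
      have hocc : (PySem.Set.inter (PySem.Set.ofList sl) occupied_cells ≠ []) ↔
          (sl.any (fun c => PySem.Set.contains occupied_cells c) = true) := by
        rw [pv_inter_ne_nil_iff, List.any_eq_true]
        constructor
        · rintro ⟨x, hx1, hx2⟩
          exact ⟨x, (PySem.Set.mem_ofList sl x).mp hx1,
            (PySem.Set.contains_iff occupied_cells x).mpr hx2⟩
        · rintro ⟨x, hx1, hx2⟩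
          exact ⟨x, (PySem.Set.mem_ofList sl x).mpr hx1,
            (PySem.Set.contains_iff occupied_cells x).mp hx2⟩
      by_cases hocc2 : sl.any (fun c => PySem.Set.contains occupied_cells c) = true
      · rw [if_pos (hocc.mpr hocc2), if_pos hocc2]
      · rw [if_neg (fun h => hocc2 (hocc.mp h)), if_neg hocc2]
        by_cases hr : r ≤ 0
        · rw [if_pos hr, if_pos hr]
        · rw [if_neg hr, if_neg hr]
          have hloop : (!(pvHasNonlocalCloseApproach candidate r)) =
              (!(pvClosePairLoop r candidate [] [])) := by
            congr 1
            rw [pvHasNonlocalCloseApproach, if_neg hr]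
            exact pv_loop_eq r candidate [] (by simpa using hnd)
          cases pre with
          | some b =>
            dsimp only
            have hb : (PySem.Set.inter (PySem.Set.ofList sl) b ≠ []) ↔
                (sl.any (fun c => PySem.Set.contains b c) = true) := by
              rw [pv_inter_ne_nil_iff, List.any_eq_true]
              constructor
              · rintro ⟨x, hx1, hx2⟩
                exact ⟨x, (PySem.Set.mem_ofList sl x).mp hx1,
                  (PySem.Set.contains_iff b x).mpr hx2⟩
              · rintro ⟨x, hx1, hx2⟩
                exact ⟨x, (PySem.Set.mem_ofList sl x).mpr hx1,
                  (PySem.Set.contains_iff b x).mp hx2⟩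
            by_cases hb2 : sl.any (fun c => PySem.Set.contains b c) = true
            · rw [if_pos (hb.mpr hb2), if_pos hb2]
            · rw [if_neg (fun h => hb2 (hb.mp h)), if_neg hb2]
              exact hloop
          | none =>
            dsimp only
            have hb : (PySem.Set.inter (PySem.Set.ofList sl) (pvDilateCells occupied_cells r) ≠ []) ↔
                (sl.any (fun c => occupied_cells.any (fun o => pvChebClose c o r)) = true) := by
              rw [pv_inter_ne_nil_iff, List.any_eq_true]
              constructor
              · rintro ⟨x, hx1, hx2⟩
                obtain ⟨c, hc, hcheb⟩ := (pv_mem_dilate occupied_cells r hr x).mp hx2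
                exact ⟨x, (PySem.Set.mem_ofList sl x).mp hx1,
                  List.any_eq_true.mpr ⟨c, hc, hcheb⟩⟩
              · rintro ⟨x, hx1, hx2⟩
                obtain ⟨c, hc, hcheb⟩ := List.any_eq_true.mp hx2
                exact ⟨x, (PySem.Set.mem_ofList sl x).mpr hx1,
                  (pv_mem_dilate occupied_cells r hr x).mpr ⟨c, hc, hcheb⟩⟩
            by_cases hb2 : sl.any (fun c => occupied_cells.any (fun o => pvChebClose c o r)) = true
            · rw [if_pos (hb.mpr hb2), if_pos hb2]
            · rw [if_neg (fun h => hb2 (hb.mp h)), if_neg hb2]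
              exact hloop
    · -- some cell invalid: A fails the validity check, B's scan fails
      have hscan : pvScanDupValid valid_cells candidate PySem.Set.empty = false := by
        rw [Bool.eq_false_iff]
        intro h
        exact hval ((pv_scan_iff _ _ _).mp h).2.1
      rw [if_neg (not_ne_iff.mpr ((pv_ofList_length_iff_nodup candidate).mpr hnd))]
      simp only [not_forall, exists_prop] at hval
      obtain ⟨c, hc, hcv⟩ := hval
      rw [if_pos (List.any_eq_true.mpr ⟨c, hc, by
        simp only [Bool.not_eq_true']
        rw [Bool.eq_false_iff]
        exact fun h => hcv ((PySem.Set.contains_iff valid_cells c).mp h)⟩)]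
      rw [hscan, if_pos (by decide)]
  · -- duplicates: A fails the set-size check, B's scan fails
    have hscan : pvScanDupValid valid_cells candidate PySem.Set.empty = false := by
      rw [Bool.eq_false_iff]
      intro h
      exact hnd ((pv_scan_iff _ _ _).mp h).1
    rw [if_pos (fun h => hnd ((pv_ofList_length_iff_nodup candidate).mp h))]
    rw [hscan, if_pos (by decide)]
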